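-- pv_equiv track=rewrite | github.com/PdxCodeGuild/class_koi | code/mobs/jacks_gone_wild/lab07.py | aging
-- ===== SOURCE A (Python) =====
-- def aging(input):
--     """
--     Ages and breeds jackalopes, takes in a list
--     """
--     # population placeholder
--     temp_jack = [0,0,0,0,0,0,0,0,0,0]
--     # iterate through each index position of input
--     for x in range(len(input)):
--         # If jacks are 'breeding age' add population to age 0 and age jacks
--         if(x >= 3 and x <= 7):
--             temp_jack[x + 1] = input[x]
--             temp_jack[0] += input[x]
--         # If jacks aren't of breeding age, age them
--         elif(x != 9):
--             temp_jack[x + 1] = input[x]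
--
--
--
--     return temp_jack
-- ===== SOURCE B (Python) =====
-- def aging(input):
--     """
--     Ages and breeds jackalopes, takes in a list
--     """
--     total = sum(input[3:8])
--     result = [0] * 10
--     result[0] = total
--     for i in range(len(input)):
--         if i != 9:
--             result[i + 1] = input[i]
--     return result
-- ===== Notes on version B (the rewrite author's own statement) =====
-- stated objective: simpler
-- what changed: B replaces A's fused loop with a three-branch conditional by a slice-sum for the newborn count followed by a single-branch shift pass into a prefilled length-10 zero list.
import Mathlib
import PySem

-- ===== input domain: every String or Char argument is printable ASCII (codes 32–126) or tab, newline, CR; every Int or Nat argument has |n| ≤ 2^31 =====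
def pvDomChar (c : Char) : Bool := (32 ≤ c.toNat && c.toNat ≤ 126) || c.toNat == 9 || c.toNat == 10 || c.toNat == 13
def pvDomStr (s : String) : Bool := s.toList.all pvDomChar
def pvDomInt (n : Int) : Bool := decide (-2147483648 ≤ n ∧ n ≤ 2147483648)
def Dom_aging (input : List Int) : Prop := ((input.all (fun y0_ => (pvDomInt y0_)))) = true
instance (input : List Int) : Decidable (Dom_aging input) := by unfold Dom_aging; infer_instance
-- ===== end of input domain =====

-- B computes the newborn count as a slice-sum and then does a single-branch shift pass (simpler decomposition); proof via a fold invariant.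


-- ===== PORT A =====
def aging (input : List Int) : List Int :=
  (PySem.List.pyRange 0 (PySem.List.len input) 1).foldl
    (fun temp_jack x =>
      if 3 ≤ x ∧ x ≤ 7 then
        let t := PySem.List.pySetD temp_jack (x + 1) (PySem.List.pyGetD input x 0)
        PySem.List.pySetD t 0 (PySem.List.pyGetD t 0 0 + PySem.List.pyGetD input x 0)
      else if x ≠ 9 then
        PySem.List.pySetD temp_jack (x + 1) (PySem.List.pyGetD input x 0)
      else temp_jack)
    [0, 0, 0, 0, 0, 0, 0, 0, 0, 0]

-- ===== PORT B =====
def aging_alt (input : List Int) : List Int :=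
  let total := (PySem.List.slice input (some 3) (some 8)).sum
  let result := PySem.List.pySetD (List.replicate 10 (0 : Int)) 0 total
  (PySem.List.pyRange 0 (PySem.List.len input) 1).foldl
    (fun result i =>
      if i ≠ 9 then PySem.List.pySetD result (i + 1) (PySem.List.pyGetD input i 0)
      else result)
    result

-- ===== PRECONDITION & SPEC =====
-- Pre_ excludes exactly the inputs with more than 10 elements, on which A (and B alike) raises IndexError.
def Pre_aging (input : List Int) : Prop := input.length ≤ 10
instance (input : List Int) : Decidable (Pre_aging input) := by unfold Pre_aging; infer_instance
def pvWitness_aging : List Int := [1, 2, 3, 4, 5, 6, 7, 8, 9, 10]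

def Spec_aging (input : List Int) (out : List Int) : Prop := out = aging_alt input
instance (input : List Int) (out : List Int) : Decidable (Spec_aging input out) := by unfold Spec_aging; infer_instance

-- ===== CLAIM (what is proved, stated in full; the proofs are below) =====
def Claim_equal_aging : Prop := ∀ (input : List Int), Dom_aging input → Pre_aging input → Spec_aging input (aging input)

-- ===== LEMMAS AND PROOFS =====

-- A's loop body, B's loop body, and A's running position-0 (newborn) accumulator, as named functions.
def stepA (input : List Int) (temp_jack : List Int) (x : Int) : List Int :=
  if 3 ≤ x ∧ x ≤ 7 then
    let t := PySem.List.pySetD temp_jack (x + 1) (PySem.List.pyGetD input x 0)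
    PySem.List.pySetD t 0 (PySem.List.pyGetD t 0 0 + PySem.List.pyGetD input x 0)
  else if x ≠ 9 then
    PySem.List.pySetD temp_jack (x + 1) (PySem.List.pyGetD input x 0)
  else temp_jack

def stepB (input : List Int) (result : List Int) (i : Int) : List Int :=
  if i ≠ 9 then PySem.List.pySetD result (i + 1) (PySem.List.pyGetD input i 0) else result

def brSum (input : List Int) (s : Int) (x : Int) : Int :=
  if 3 ≤ x ∧ x ≤ 7 then s + PySem.List.pyGetD input x 0 else s

lemma aging_def (input : List Int) :
    aging input = (PySem.List.pyRange 0 (PySem.List.len input) 1).foldl (stepA input)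
      [0, 0, 0, 0, 0, 0, 0, 0, 0, 0] := rfl

lemma aging_alt_def (input : List Int) :
    aging_alt input = (PySem.List.pyRange 0 (PySem.List.len input) 1).foldl (stepB input)
      (PySem.List.pySetD (List.replicate 10 (0 : Int)) 0
        ((PySem.List.slice input (some 3) (some 8)).sum)) := rfl

-- B's loop never touches position 0, so a store at position 0 commutes out of the whole fold.
lemma foldl_stepB_set0 (input : List Int) (L : List Int) (hL : ∀ i ∈ L, 0 ≤ i)
    (t : List Int) (s : Int) :
    L.foldl (stepB input) (t.set 0 s) = (L.foldl (stepB input) t).set 0 s := by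
  induction L generalizing t s with
  | nil => rfl
  | cons x L ih =>
    have hx : (0:Int) ≤ x := hL x List.mem_cons_self
    have hL' : ∀ i ∈ L, (0:Int) ≤ i := fun i hi => hL i (List.mem_cons_of_mem _ hi)
    have hnz : (0:Nat) ≠ (x + 1).toNat := by omega
    simp only [List.foldl_cons]
    by_cases h9 : x = 9
    · simp only [stepB, h9, ne_eq, not_true_eq_false, if_false]
      exact ih hL' t s
    · simp only [stepB, ne_eq, h9, not_false_eq_true, if_true,
        PySem.List.pySetD_of_nonneg _ _ (by omega : (0:Int) ≤ x + 1)]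
      rw [List.set_comm _ _ hnz]
      exact ih hL' _ s

-- Invariant: A's state is B's state with the running newborn sum stored at position 0.
lemma foldl_stepA_rel (input : List Int) (L : List Int) (hL : ∀ i ∈ L, 0 ≤ i)
    (t : List Int) (ht : t.length = 10) (s : Int) :
    L.foldl (stepA input) (t.set 0 s)
      = (L.foldl (stepB input) t).set 0 (L.foldl (brSum input) s) := by
  induction L generalizing t s with
  | nil => rfl
  | cons x L ih =>
    have hx : (0:Int) ≤ x := hL x List.mem_cons_self
    have hL' : ∀ i ∈ L, (0:Int) ≤ i := fun i hi => hL i (List.mem_cons_of_mem _ hi)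
    have hnz : (0:Nat) ≠ (x + 1).toNat := by omega
    simp only [List.foldl_cons]
    by_cases hb : 3 ≤ x ∧ x ≤ 7
    · have h9 : x ≠ 9 := by omega
      simp only [stepA, stepB, brSum, if_pos hb, ne_eq, h9, not_false_eq_true, if_true,
        PySem.List.pySetD_of_nonneg _ _ (by omega : (0:Int) ≤ x + 1),
        PySem.List.pySetD_of_nonneg _ _ (le_refl (0:Int)), Int.toNat_zero]
      have hread : PySem.List.pyGetD
          ((t.set 0 s).set (x+1).toNat (PySem.List.pyGetD input x 0)) 0 0 = s := by
        rw [PySem.List.pyGetD_zero, List.getD_eq_getElem?_getD,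
          List.getElem?_set_ne hnz.symm, List.getElem?_set_self',
          List.getElem?_eq_getElem (by omega : 0 < t.length)]
        rfl
      rw [hread, List.set_comm _ _ hnz.symm, List.set_set, List.set_comm _ _ hnz]
      refine ih hL' _ ?_ _
      simp [ht]
    · by_cases h9 : x = 9
      · simp only [stepA, stepB, brSum, h9, ne_eq, not_true_eq_false, if_false]
        exact ih hL' t ht s
      · simp only [stepA, stepB, brSum, if_neg hb, ne_eq, h9, not_false_eq_true, if_true,
          PySem.List.pySetD_of_nonneg _ _ (by omega : (0:Int) ≤ x + 1)]
        rw [List.set_comm _ _ hnz]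
        exact ih hL' _ (by simp [ht]) s

-- The running newborn sum over indices 0..n-1 is the sum of the slice input[3:8].
lemma brSum_range (input : List Int) (n : Nat) (c : Int) :
    (List.range n).foldl (fun (s : Int) (j : Nat) => brSum input s (j : Int)) c
      = c + (((input.take n).drop 3).take 5).sum := by
  induction n generalizing c with
  | zero => simp
  | succ n ih =>
    rw [List.range_succ, List.foldl_append, ih]
    simp only [List.foldl_cons, List.foldl_nil]
    have hcond : (3 ≤ ((n:Nat):Int) ∧ ((n:Nat):Int) ≤ 7) ↔ (3 ≤ n ∧ n ≤ 7) := by omega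
    by_cases hn : n < input.length
    · have hlt : (input.take n).length = n := by rw [List.length_take]; omega
      have hget : PySem.List.pyGetD input ((n:Nat) : Int) 0 = input[n] := by
        rw [PySem.List.pyGetD_natCast, List.getD_eq_getElem?_getD, List.getElem?_eq_getElem hn]
        rfl
      rw [show List.take (n+1) input = List.take n input ++ input[n]?.toList from
            List.take_add_one]
      rw [List.getElem?_eq_getElem hn]
      simp only [Option.toList_some]
      by_cases h3 : 3 ≤ n ∧ n ≤ 7
      · rw [List.drop_append_of_le_length (by omega)]
        have e2 : ((input.take n).drop 3).length = n - 3 := by rw [List.length_drop, hlt]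
        rw [List.take_of_length_le (l := (input.take n).drop 3 ++ [input[n]])
              (by simp [e2]; omega),
            List.take_of_length_le (l := (input.take n).drop 3) (by rw [e2]; omega),
            List.sum_append]
        simp only [brSum, if_pos (hcond.mpr h3), hget, List.sum_cons, List.sum_nil]
        ring
      · simp only [brSum, if_neg (fun h => h3 (hcond.mp h)), hget]
        by_cases h3n : n < 3
        · rw [List.drop_eq_nil_of_le (as := input.take n ++ [input[n]]) (by simp; omega),
              List.drop_eq_nil_of_le (as := input.take n) (by rw [hlt]; omega)]
        · have h8n : 8 ≤ n := by omega
          rw [List.drop_append_of_le_length (by omega)]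
          have e2 : ((input.take n).drop 3).length = n - 3 := by rw [List.length_drop, hlt]
          rw [List.take_append_of_le_length (by rw [e2]; omega)]
    · have hge : input.length ≤ n := by omega
      rw [List.take_of_length_le (l := input) (i := n) hge,
        List.take_of_length_le (l := input) (i := n + 1) (by omega)]
      have hget : PySem.List.pyGetD input ((n:Nat) : Int) 0 = 0 := by
        rw [PySem.List.pyGetD_natCast, List.getD_eq_getElem?_getD,
          List.getElem?_eq_none (by omega)]
        rfl
      simp [brSum, hget]

-- ===== VERDICT (by name: the statement is the Claim_ definition above) =====
theorem aging_spec : Claim_equal_aging := by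
  intro input _ hpre
  unfold Spec_aging
  rw [aging_def, aging_alt_def]
  have hrange : PySem.List.pyRange 0 (PySem.List.len input) 1
      = (List.range input.length).map (fun (k : Nat) => (k : Int)) := by
    rw [PySem.List.len_eq, PySem.List.pyRange_zero_natCast]
  have hmem : ∀ i ∈ (List.range input.length).map (fun (k : Nat) => (k : Int)), (0:Int) ≤ i := by
    intro i hi
    simp only [List.mem_map] at hi
    obtain ⟨k, _, rfl⟩ := hi
    exact Int.natCast_nonneg k
  rw [hrange]
  rw [show ([0, 0, 0, 0, 0, 0, 0, 0, 0, 0] : List Int)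
      = (([0, 0, 0, 0, 0, 0, 0, 0, 0, 0] : List Int)).set 0 0 from rfl]
  rw [foldl_stepA_rel input _ hmem _ (by rfl) 0]
  rw [show PySem.List.pySetD (List.replicate 10 (0:Int)) 0
        ((PySem.List.slice input (some 3) (some 8)).sum)
      = ([0, 0, 0, 0, 0, 0, 0, 0, 0, 0] : List Int).set 0
          ((PySem.List.slice input (some 3) (some 8)).sum) from by
    rw [PySem.List.pySetD_of_nonneg _ _ (le_refl (0:Int))]
    rfl]
  rw [foldl_stepB_set0 input _ hmem]
  congr 1
  rw [List.foldl_map, brSum_range]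
  have hslice : PySem.List.slice input (some 3) (some 8) = (input.drop 3).take 5 := by
    have h := PySem.List.slice_natCast input 3 8
    simpa using h
  rw [hslice, List.take_length]
  simp
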